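-- pv_equiv track=rewrite | github.com/loic-crampon/advent-of-code-2024 | day-09/day-09-part-2.py | find_first_free_block
-- ===== SOURCE A (Python) =====
-- def find_first_free_block(blocks, size):
--     size_block = 0
--     for i in range(len(blocks)):
--         if (blocks[i] == "."):
--             size_block += 1
--         else:
--             size_block = 0
--         if (size_block == size):
--             return i - size_block + 1
--     return -1
-- ===== SOURCE B (Python) =====
-- def find_first_free_block(blocks, size):
--     obstacles = [i for i, b in enumerate(blocks) if b != "."]
--     edges = [-1] + obstacles + [len(blocks)]
--     for prev, nxt in zip(edges, edges[1:]):
--         if nxt - prev - 1 >= size: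
--             return prev + 1
--     return -1
-- ===== Notes on version B (the rewrite author's own statement) =====
-- stated objective: alternative
-- what changed: A counts the current run of '.' elements with a running counter reset at each obstacle; B first builds the list of obstacle indices with an enumerate-filter comprehension, brackets it with -1 and len(blocks), and scans consecutive edge pairs for the first gap of width >= size.
-- intended difference: For size == 0 (inside Pre_) A returns the index just after the first non-'.' element (or -1 if there is none), an artefact of the counter being reset to 0 and compared to size; B returns 0, the start of the first (empty) run, which is the intended answer for a request of zero free blocks. — e.g. on find_first_free_block(["a"], 0): A returns 1, B returns 0
-- outside the precondition, e.g. on find_first_free_block(['.'], -1): A returns -1, B returns 0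
import Mathlib
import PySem

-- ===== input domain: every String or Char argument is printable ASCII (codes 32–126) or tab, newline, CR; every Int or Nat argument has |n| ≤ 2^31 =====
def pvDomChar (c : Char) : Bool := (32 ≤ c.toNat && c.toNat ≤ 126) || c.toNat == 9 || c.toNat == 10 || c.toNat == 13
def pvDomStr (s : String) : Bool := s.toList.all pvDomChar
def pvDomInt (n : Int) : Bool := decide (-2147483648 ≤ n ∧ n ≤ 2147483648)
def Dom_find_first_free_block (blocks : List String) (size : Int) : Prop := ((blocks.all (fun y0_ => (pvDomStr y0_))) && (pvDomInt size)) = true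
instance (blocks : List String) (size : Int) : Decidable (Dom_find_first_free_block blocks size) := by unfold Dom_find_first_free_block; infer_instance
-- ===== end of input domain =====

-- B replaces A's run-length counter with an obstacle-index list bracketed by -1/len and a scan
-- of consecutive gaps; same O(n) cost, different structure. For size = 0 B intentionally returns 0
-- (start of the first empty run) where A returns the index after the first obstacle (see D_ below).


-- ===== PORT A =====
-- loop over the list carrying the index i and the run counter size_block
def pvGoA (size : Int) : List String → Int → Int → Int
  | [], _, _ => -1
  | b :: rest, i, cnt =>
    let cnt' := if b = "." then cnt + 1 else 0
    if cnt' = size then i - cnt' + 1 else pvGoA size rest (i + 1) cnt'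

def find_first_free_block (blocks : List String) (size : Int) : Int :=
  pvGoA size blocks 0 0

-- ===== PORT B =====
-- for prev, nxt in zip(edges, edges[1:]): first gap of width >= size
def pvScanPairs (size : Int) : List Int → Int
  | prev :: nxt :: rest => if nxt - prev - 1 ≥ size then prev + 1 else pvScanPairs size (nxt :: rest)
  | _ => -1

def find_first_free_block_alt (blocks : List String) (size : Int) : Int :=
  let obstacles := ((PySem.List.enumerate blocks 0).filter (fun p => p.2 ≠ ".")).map (fun p => p.1)
  let edges := -1 :: (obstacles ++ [(blocks.length : Int)])
  pvScanPairs size edges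

-- ===== PRECONDITION & SPEC =====
-- Pre_ restricts to size ≥ 0, the natural domain of a requested block count; for negative size
-- A returns -1 while B reports the trivially found empty run at index 0.
def Pre_find_first_free_block (blocks : List String) (size : Int) : Prop := 0 ≤ size
instance (blocks : List String) (size : Int) : Decidable (Pre_find_first_free_block blocks size) := by unfold Pre_find_first_free_block; infer_instance
def pvWitness_find_first_free_block : List String × Int := (["."], 1)

-- For size = 0 A returns the index just after the first non-'.' element (or -1 if none), an artefact
-- of the reset counter hitting size; B returns 0, the start of the first (empty) run, the intended answer.
def D_find_first_free_block (blocks : List String) (size : Int) : Prop := size = 0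
instance (blocks : List String) (size : Int) : Decidable (D_find_first_free_block blocks size) := by unfold D_find_first_free_block; infer_instance

def Spec_find_first_free_block (blocks : List String) (size : Int) (out : Int) : Prop := ¬ D_find_first_free_block blocks size → out = find_first_free_block_alt blocks size
instance (blocks : List String) (size : Int) (out : Int) : Decidable (Spec_find_first_free_block blocks size out) := by unfold Spec_find_first_free_block; infer_instance

def pvDiffWitness_find_first_free_block : List String × Int := (["a"], 0)
def pvDiffWitnessOut_find_first_free_block : Int × Int := (1, 0)

-- ===== CLAIM (what is proved, stated in full; the proofs are below) =====
def Claim_unchanged_find_first_free_block : Prop := ∀ (blocks : List String) (size : Int), Dom_find_first_free_block blocks size → Pre_find_first_free_block blocks size → Spec_find_first_free_block blocks size (find_first_free_block blocks size)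
def Claim_changed_find_first_free_block : Prop := Dom_find_first_free_block (pvDiffWitness_find_first_free_block.1) (pvDiffWitness_find_first_free_block.2) ∧ Pre_find_first_free_block (pvDiffWitness_find_first_free_block.1) (pvDiffWitness_find_first_free_block.2) ∧ D_find_first_free_block (pvDiffWitness_find_first_free_block.1) (pvDiffWitness_find_first_free_block.2) ∧ find_first_free_block (pvDiffWitness_find_first_free_block.1) (pvDiffWitness_find_first_free_block.2) = pvDiffWitnessOut_find_first_free_block.1 ∧ find_first_free_block_alt (pvDiffWitness_find_first_free_block.1) (pvDiffWitness_find_first_free_block.2) = pvDiffWitnessOut_find_first_free_block.2 ∧ pvDiffWitnessOut_find_first_free_block.1 ≠ pvDiffWitnessOut_find_first_free_block.2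
def Claim_exact_find_first_free_block : Prop := ∀ (blocks : List String) (size : Int), Dom_find_first_free_block blocks size → Pre_find_first_free_block blocks size → D_find_first_free_block blocks size → find_first_free_block blocks size ≠ find_first_free_block_alt blocks size

-- ===== LEMMAS AND PROOFS =====

-- obstacle indices of blocks, starting at offset s (spec of the enumerate-filter-map comprehension)
def pvObsFrom (s : Int) : List String → List Int
  | [] => []
  | b :: rest => if b = "." then pvObsFrom (s + 1) rest else s :: pvObsFrom (s + 1) rest

theorem pvObs_eq (blocks : List String) (s : Int) :
    ((PySem.List.enumerate blocks s).filter (fun p => p.2 ≠ ".")).map (fun p => p.1) = pvObsFrom s blocks := by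
  induction blocks generalizing s with
  | nil => simp [PySem.List.enumerate_nil, pvObsFrom]
  | cons b rest ih =>
    rw [PySem.List.enumerate_cons]
    by_cases hb : b = "."
    · rw [pvObsFrom, if_pos hb, List.filter_cons_of_neg (by simp [hb]), ih]
    · rw [pvObsFrom, if_neg hb, List.filter_cons_of_pos (by simp [hb]), List.map_cons, ih]

-- intermediate single-pass form of B: last obstacle index prev, current index i
def pvGo (size : Int) : List String → Int → Int → Int
  | [], i, prev => if i - prev - 1 ≥ size then prev + 1 else -1
  | b :: rest, i, prev =>
    if b = "." then pvGo size rest (i + 1) prev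
    else if i - prev - 1 ≥ size then prev + 1 else pvGo size rest (i + 1) i

theorem pvScan_eq_go (size : Int) (blocks : List String) (i prev : Int) :
    pvScanPairs size (prev :: (pvObsFrom i blocks ++ [i + (blocks.length : Int)])) = pvGo size blocks i prev := by
  induction blocks generalizing i prev with
  | nil => simp [pvObsFrom, pvScanPairs, pvGo]
  | cons b rest ih =>
    have h2 : (i : Int) + ((rest.length + 1 : Nat) : Int) = (i + 1) + (rest.length : Int) := by
      push_cast; ring
    by_cases hb : b = "."
    · rw [pvObsFrom, if_pos hb, pvGo, if_pos hb, List.length_cons, h2, ih]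
    · rw [pvObsFrom, if_neg hb, pvGo, if_neg hb, List.length_cons, h2, List.cons_append,
        pvScanPairs, ih]

theorem pvGo_done (size : Int) (blocks : List String) (i prev : Int) (h : i - prev - 1 ≥ size) :
    pvGo size blocks i prev = prev + 1 := by
  induction blocks generalizing i prev with
  | nil => simp [pvGo, h]
  | cons b rest ih =>
    by_cases hb : b = "."
    · rw [pvGo, if_pos hb, ih _ _ (by omega)]
    · rw [pvGo, if_neg hb, if_pos h]

theorem pvGoA_eq_go (size : Int) (hs : 1 ≤ size) (blocks : List String) (i prev : Int)
    (h0 : 0 ≤ i - prev - 1) (hlt : i - prev - 1 < size) :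
    pvGoA size blocks i (i - prev - 1) = pvGo size blocks i prev := by
  induction blocks generalizing i prev with
  | nil => rw [pvGoA, pvGo, if_neg (by omega)]
  | cons b rest ih =>
    by_cases hb : b = "."
    · simp only [pvGoA, pvGo, if_pos hb]
      by_cases he : i - prev - 1 + 1 = size
      · rw [if_pos he, pvGo_done size rest (i + 1) prev (by omega)]
        omega
      · rw [if_neg he]
        have hc : i - prev - 1 + 1 = (i + 1) - prev - 1 := by omega
        rw [hc, ih (i + 1) prev (by omega) (by omega)]
    · simp only [pvGoA, pvGo, if_neg hb]
      rw [if_neg (by omega), if_neg (by omega)]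
      have hc : (0 : Int) = (i + 1) - i - 1 := by omega
      rw [hc, ih (i + 1) i (by omega) (by omega)]

theorem pvObs_nonneg (blocks : List String) (s : Int) (hs : 0 ≤ s) :
    ∀ x ∈ pvObsFrom s blocks, 0 ≤ x := by
  induction blocks generalizing s with
  | nil => simp [pvObsFrom]
  | cons b rest ih =>
    intro x hx
    rw [pvObsFrom] at hx
    split at hx
    · exact ih (s + 1) (by omega) x hx
    · rcases List.mem_cons.mp hx with h | h
      · omega
      · exact ih (s + 1) (by omega) x h

-- B returns 0 whenever size ≤ 0
theorem pvAlt_zero (blocks : List String) (size : Int) (hs : size ≤ 0) :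
    find_first_free_block_alt blocks size = 0 := by
  unfold find_first_free_block_alt
  rw [pvObs_eq]
  cases hobs : pvObsFrom 0 blocks with
  | nil =>
    simp only [List.nil_append, pvScanPairs]
    rw [if_pos (by have := Int.natCast_nonneg blocks.length; omega)]
    norm_num
  | cons x t =>
    have hx : 0 ≤ x := pvObs_nonneg blocks 0 (le_refl 0) x (by rw [hobs]; exact List.mem_cons_self ..)
    simp only [List.cons_append, pvScanPairs]
    rw [if_pos (by omega)]
    norm_num

-- A never returns 0 when size ≤ 0 and the start index is ≥ 0
theorem pvGoA_ne_zero (size : Int) (hs : size ≤ 0) (blocks : List String) (i cnt : Int) (hi : 0 ≤ i) :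
    pvGoA size blocks i cnt ≠ 0 := by
  induction blocks generalizing i cnt with
  | nil => rw [pvGoA]; omega
  | cons b rest ih =>
    by_cases hb : b = "."
    · simp only [pvGoA, if_pos hb]
      split
      · omega
      · exact ih (i + 1) _ (by omega)
    · simp only [pvGoA, if_neg hb]
      split
      · omega
      · exact ih (i + 1) _ (by omega)

-- ===== VERDICT (by name: the statement is the Claim_ definition above) =====
theorem find_first_free_block_spec : Claim_unchanged_find_first_free_block := by
  intro blocks size _ hpre hnd
  unfold Pre_find_first_free_block at hpre
  unfold D_find_first_free_block at hnd
  have hs : 1 ≤ size := by omega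
  show find_first_free_block blocks size = find_first_free_block_alt blocks size
  unfold find_first_free_block find_first_free_block_alt
  rw [pvObs_eq]
  have h0 : (0 : Int) = 0 - (-1) - 1 := by omega
  calc pvGoA size blocks 0 0 = pvGoA size blocks 0 (0 - (-1) - 1) := by rw [← h0]
    _ = pvGo size blocks 0 (-1) := pvGoA_eq_go size hs blocks 0 (-1) (by omega) (by omega)
    _ = pvScanPairs size (-1 :: (pvObsFrom 0 blocks ++ [(0 : Int) + (blocks.length : Int)])) :=
        (pvScan_eq_go size blocks 0 (-1)).symm
    _ = pvScanPairs size (-1 :: (pvObsFrom 0 blocks ++ [(blocks.length : Int)])) := by norm_num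

theorem find_first_free_block_changed : Claim_changed_find_first_free_block := by
  unfold Claim_changed_find_first_free_block; decide

theorem find_first_free_block_tight : Claim_exact_find_first_free_block := by
  intro blocks size _ _ hd
  unfold D_find_first_free_block at hd
  subst hd
  rw [pvAlt_zero blocks 0 (le_refl 0)]
  exact pvGoA_ne_zero 0 (le_refl 0) blocks 0 0 (le_refl 0)
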